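-- pv_equiv track=rewrite | github.com/rasakereh/bitphylogeny | code/config.py | _get_parental_copy_number_states
-- ===== SOURCE A (Python) =====
-- def _get_parental_copy_number_states(normal_cn, minor_cn, major_cn):
--     states = set()
--
--     g_n = 'A' * normal_cn
--
--     total_cn = minor_cn + major_cn
--
--     if normal_cn == total_cn:
--         if minor_cn == 0:
--             ref_genotypes = [g_n, g_n]
--
--             var_genotypes = [
--                              'A' * minor_cn + 'B' * major_cn,
--                              'A' * (total_cn - 1) + 'B'
--                              ]
--         else:
--             ref_genotypes = [g_n, g_n, g_n]
--
--             var_genotypes = [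
--                              'A' * minor_cn + 'B' * major_cn,
--                              'A' * major_cn + 'B' * minor_cn,
--                              'A' * (total_cn - 1) + 'B'
--                              ]
--
--     else:
--         if minor_cn == 0:
--             ref_genotypes = [g_n, g_n, 'A' * total_cn]
--
--             var_genotypes = [
--                              'A' * minor_cn + 'B' * major_cn,
--                              'A' * (total_cn - 1) + 'B',
--                              'A' * (total_cn - 1) + 'B'
--                              ]
--         else:
--             ref_genotypes = [g_n, g_n, g_n, 'A' * total_cn]
--
--             var_genotypes = [
--                              'A' * minor_cn + 'B' * major_cn,
--                              'A' * major_cn + 'B' * minor_cn,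
--                              'A' * (total_cn - 1) + 'B',
--                              'A' * (total_cn - 1) + 'B'
--                              ]
--
--     for g_r, g_v in zip(ref_genotypes, var_genotypes):
--         state = (g_n, g_r, g_v)
--
--         states.add(state)
--
--     return sorted(states)
-- ===== SOURCE B (Python) =====
-- def _get_parental_copy_number_states(normal_cn, minor_cn, major_cn):
--     # Every genotype in a state is 'A'*(total-b) + 'B'*b for some B-count b:
--     # enumerate the admissible B-counts instead of branching over cases.
--     g_n = 'A' * normal_cn
--     total = minor_cn + major_cn
--
--     def variant(b):
--         return 'A' * (total - b) + 'B' * b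
--
--     b_counts = {major_cn, 1}
--     if minor_cn:
--         b_counts.add(minor_cn)
--
--     states = {(g_n, g_n, variant(b)) for b in b_counts}
--     states.add((g_n, 'A' * total, variant(1)))
--     return sorted(states)
-- ===== Notes on version B (the rewrite author's own statement) =====
-- stated objective: alternative
-- what changed: B abstracts every genotype as 'A'*(total-b)+'B'*b for a B-count b and generates the states by iterating over a computed set of admissible B-counts {major_cn, 1} (+ minor_cn when nonzero) plus the one extra-reference state, instead of A's 4-way branch over (normal_cn==total, minor_cn==0) zipping parallel ref/var genotype lists.
import Mathlib
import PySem

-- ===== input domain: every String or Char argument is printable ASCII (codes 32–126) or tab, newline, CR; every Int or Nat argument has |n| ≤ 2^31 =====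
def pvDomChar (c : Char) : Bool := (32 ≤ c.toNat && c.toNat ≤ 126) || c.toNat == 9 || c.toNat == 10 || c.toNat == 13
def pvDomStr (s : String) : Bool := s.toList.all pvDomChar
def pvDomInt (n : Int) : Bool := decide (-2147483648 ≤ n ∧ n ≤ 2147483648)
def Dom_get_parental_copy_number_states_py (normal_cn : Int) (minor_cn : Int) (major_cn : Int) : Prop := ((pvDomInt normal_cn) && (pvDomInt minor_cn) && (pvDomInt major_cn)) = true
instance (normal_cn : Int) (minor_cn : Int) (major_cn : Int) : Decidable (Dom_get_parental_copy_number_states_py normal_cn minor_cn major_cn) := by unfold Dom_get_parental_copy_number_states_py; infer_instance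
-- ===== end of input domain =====

-- B generates the states from a computed set of admissible B-counts (every genotype is
-- 'A'*(total-b)+'B'*b) instead of A's 4-way branch over zipped ref/var lists; same cost.

-- shared string builders: 'A' * n  and  'A' * a + 'B' * b  (Python string repetition = PySem.List.pyRepeat on code points)
def pvStrA (n : Int) : String := String.ofList (PySem.List.pyRepeat ['A'] n)
def pvStrAB (a b : Int) : String := String.ofList (PySem.List.pyRepeat ['A'] a ++ PySem.List.pyRepeat ['B'] b)
-- Python's default tuple comparison in sorted(states): lexicographic on the three strings
def pvKey (t : String × String × String) : Lex (String × Lex (String × String)) := toLex (t.1, toLex (t.2.1, t.2.2))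

-- ===== PORT A =====
def get_parental_copy_number_states_py (normal_cn : Int) (minor_cn : Int) (major_cn : Int) : List (String × String × String) :=
  let g_n := pvStrA normal_cn
  let total_cn := minor_cn + major_cn
  let rv : List String × List String :=
    if normal_cn = total_cn then
      if minor_cn = 0 then
        ([g_n, g_n], [pvStrAB minor_cn major_cn, pvStrAB (total_cn - 1) 1])
      else
        ([g_n, g_n, g_n], [pvStrAB minor_cn major_cn, pvStrAB major_cn minor_cn, pvStrAB (total_cn - 1) 1])
    else
      if minor_cn = 0 then
        ([g_n, g_n, pvStrA total_cn], [pvStrAB minor_cn major_cn, pvStrAB (total_cn - 1) 1, pvStrAB (total_cn - 1) 1])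
      else
        ([g_n, g_n, g_n, pvStrA total_cn], [pvStrAB minor_cn major_cn, pvStrAB major_cn minor_cn, pvStrAB (total_cn - 1) 1, pvStrAB (total_cn - 1) 1])
  let states := (List.zip rv.1 rv.2).foldl (fun s p => PySem.Set.add s (g_n, p.1, p.2)) PySem.Set.empty
  PySem.List.sorted states pvKey false

-- ===== PORT B =====
def get_parental_copy_number_states_py_alt (normal_cn : Int) (minor_cn : Int) (major_cn : Int) : List (String × String × String) :=
  let g_n := pvStrA normal_cn
  let total := minor_cn + major_cn
  let variant := fun (b : Int) => pvStrAB (total - b) b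
  let b_counts : PySem.Set Int := PySem.Set.ofList [major_cn, 1]
  let b_counts := if minor_cn ≠ 0 then PySem.Set.add b_counts minor_cn else b_counts
  -- {(g_n, g_n, variant(b)) for b in b_counts}: a set comprehension over a set (order-independent result)
  let states := b_counts.foldl (fun s b => PySem.Set.add s (g_n, g_n, variant b)) PySem.Set.empty
  let states := PySem.Set.add states (g_n, pvStrA total, variant 1)
  PySem.List.sorted states pvKey false

-- ===== PRECONDITION & SPEC =====
def Spec_get_parental_copy_number_states_py (normal_cn : Int) (minor_cn : Int) (major_cn : Int) (out : List (String × String × String)) : Prop := out = get_parental_copy_number_states_py_alt normal_cn minor_cn major_cn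
instance (normal_cn : Int) (minor_cn : Int) (major_cn : Int) (out : List (String × String × String)) : Decidable (Spec_get_parental_copy_number_states_py normal_cn minor_cn major_cn out) := by unfold Spec_get_parental_copy_number_states_py; infer_instance

-- ===== CLAIM (what is proved, stated in full; the proofs are below) =====
def Claim_equal_get_parental_copy_number_states_py : Prop := ∀ (normal_cn : Int) (minor_cn : Int) (major_cn : Int), Dom_get_parental_copy_number_states_py normal_cn minor_cn major_cn → Spec_get_parental_copy_number_states_py normal_cn minor_cn major_cn (get_parental_copy_number_states_py normal_cn minor_cn major_cn)

-- ===== LEMMAS AND PROOFS =====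

theorem pvKey_injective : Function.Injective pvKey := by
  intro ⟨a1, a2, a3⟩ ⟨b1, b2, b3⟩ h
  simpa [pvKey, Prod.ext_iff] using h

-- membership in a fold of Set.add over a list
theorem pv_mem_foldl_add {α β : Type} [BEq α] [LawfulBEq α] (f : β → α) :
    ∀ (l : List β) (s : List α) (x : α),
      x ∈ l.foldl (fun s b => PySem.Set.add s (f b)) s ↔ x ∈ s ∨ ∃ b ∈ l, x = f b := by
  intro l
  induction l with
  | nil => simp
  | cons hd tl ih =>
      intro s x
      simp only [List.foldl_cons, ih, PySem.Set.mem_add, List.mem_cons]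
      constructor
      · rintro (( h | h ) | ⟨b, hb, rfl⟩)
        · exact Or.inl h
        · exact Or.inr ⟨hd, Or.inl rfl, h⟩
        · exact Or.inr ⟨b, Or.inr hb, rfl⟩
      · rintro (h | ⟨b, (rfl | hb), rfl⟩)
        · exact Or.inl (Or.inl h)
        · exact Or.inl (Or.inr rfl)
        · exact Or.inr ⟨b, hb, rfl⟩

theorem pv_nodup_foldl_add {α β : Type} [BEq α] [LawfulBEq α] (f : β → α) :
    ∀ (l : List β) (s : List α), s.Nodup →
      (l.foldl (fun s b => PySem.Set.add s (f b)) s).Nodup := by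
  intro l
  induction l with
  | nil => intro s hs; simpa using hs
  | cons hd tl ih => intro s hs; exact ih _ (PySem.Set.nodup_add _ _ hs)

-- the two dedup accumulations have the same members and no duplicates, hence are
-- permutations, and sorting by an injective key ignores the arrangement
theorem pv_main (normal_cn minor_cn major_cn : Int) :
    get_parental_copy_number_states_py normal_cn minor_cn major_cn =
    get_parental_copy_number_states_py_alt normal_cn minor_cn major_cn := by
  unfold get_parental_copy_number_states_py get_parental_copy_number_states_py_alt
  apply PySem.List.sorted_eq_sorted_of_perm _ _ pvKey pvKey_injective
  refine (List.perm_ext_iff_of_nodup ?_ ?_).mpr ?_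
  · split_ifs <;>
    · repeat' apply PySem.Set.nodup_add
      exact List.nodup_nil
  · apply PySem.Set.nodup_add
    apply pv_nodup_foldl_add
    exact List.nodup_nil
  · intro x
    by_cases h1 : normal_cn = minor_cn + major_cn <;> by_cases h2 : minor_cn = 0
    · -- normal = total, minor = 0
      rw [if_pos h1, if_pos h2, if_neg (by simpa using h2)]
      simp only [List.zip, List.zipWith, List.foldl, pv_mem_foldl_add, PySem.Set.mem_add,
        PySem.Set.mem_ofList, PySem.Set.empty, List.mem_cons, List.not_mem_nil, or_false,
        false_or]
      rw [← h1]
      have hm : normal_cn - major_cn = minor_cn := by omega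
      constructor
      · rintro (rfl | rfl)
        · exact Or.inl ⟨major_cn, Or.inl rfl, by rw [hm]⟩
        · exact Or.inl ⟨1, Or.inr rfl, rfl⟩
      · rintro (⟨b, (rfl | rfl), rfl⟩ | rfl)
        · exact Or.inl (by rw [hm])
        · exact Or.inr rfl
        · exact Or.inr rfl
    · -- normal = total, minor ≠ 0
      rw [if_pos h1, if_neg h2, if_pos (by simpa using h2)]
      simp only [List.zip, List.zipWith, List.foldl, pv_mem_foldl_add, PySem.Set.mem_add,
        PySem.Set.mem_ofList, PySem.Set.empty, List.mem_cons, List.not_mem_nil, or_false,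
        false_or]
      rw [← h1]
      have hma : normal_cn - major_cn = minor_cn := by omega
      have hmi : normal_cn - minor_cn = major_cn := by omega
      constructor
      · rintro ((rfl | rfl) | rfl)
        · exact Or.inl ⟨major_cn, Or.inl (Or.inl rfl), by rw [hma]⟩
        · exact Or.inl ⟨minor_cn, Or.inr rfl, by rw [hmi]⟩
        · exact Or.inl ⟨1, Or.inl (Or.inr rfl), rfl⟩
      · rintro (⟨b, ((rfl | rfl) | rfl), rfl⟩ | rfl)
        · exact Or.inl (Or.inl (by rw [hma]))
        · exact Or.inr rfl
        · exact Or.inl (Or.inr (by rw [hmi]))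
        · exact Or.inr rfl
    · -- normal ≠ total, minor = 0
      rw [if_neg h1, if_pos h2, if_neg (by simpa using h2)]
      simp only [List.zip, List.zipWith, List.foldl, pv_mem_foldl_add, PySem.Set.mem_add,
        PySem.Set.mem_ofList, PySem.Set.empty, List.mem_cons, List.not_mem_nil, or_false,
        false_or]
      have hm : minor_cn + major_cn - major_cn = minor_cn := by omega
      constructor
      · rintro ((rfl | rfl) | rfl)
        · exact Or.inl ⟨major_cn, Or.inl rfl, by rw [hm]⟩
        · exact Or.inl ⟨1, Or.inr rfl, rfl⟩
        · exact Or.inr rfl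
      · rintro (⟨b, (rfl | rfl), rfl⟩ | rfl)
        · exact Or.inl (Or.inl (by rw [hm]))
        · exact Or.inl (Or.inr rfl)
        · exact Or.inr rfl
    · -- normal ≠ total, minor ≠ 0
      rw [if_neg h1, if_neg h2, if_pos (by simpa using h2)]
      simp only [List.zip, List.zipWith, List.foldl, pv_mem_foldl_add, PySem.Set.mem_add,
        PySem.Set.mem_ofList, PySem.Set.empty, List.mem_cons, List.not_mem_nil, or_false,
        false_or]
      have hma : minor_cn + major_cn - major_cn = minor_cn := by omega
      have hmi : minor_cn + major_cn - minor_cn = major_cn := by omega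
      constructor
      · rintro (((rfl | rfl) | rfl) | rfl)
        · exact Or.inl ⟨major_cn, Or.inl (Or.inl rfl), by rw [hma]⟩
        · exact Or.inl ⟨minor_cn, Or.inr rfl, by rw [hmi]⟩
        · exact Or.inl ⟨1, Or.inl (Or.inr rfl), rfl⟩
        · exact Or.inr rfl
      · rintro (⟨b, ((rfl | rfl) | rfl), rfl⟩ | rfl)
        · exact Or.inl (Or.inl (Or.inl (by rw [hma])))
        · exact Or.inl (Or.inr rfl)
        · exact Or.inl (Or.inl (Or.inr (by rw [hmi])))
        · exact Or.inr rfl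

-- ===== VERDICT (by name: the statement is the Claim_ definition above) =====
theorem get_parental_copy_number_states_py_spec : Claim_equal_get_parental_copy_number_states_py := by
  intro normal_cn minor_cn major_cn _
  exact pv_main normal_cn minor_cn major_cn
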